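-- pv_equiv track=rewrite | github.com/BelisaDi/Proyecto-Logica-2 | HorariosQueFunciona2.py | tseitin
-- ===== SOURCE A (Python) =====
-- def tseitin(A, atomos):
--     listax = []
--     for i in range(1,500):
--         listax.append(chr(i+10000))
--     l = []
--     pila = []
--     i = -1
--     s = A[0]
--     while len(A) > 0:
--         if(s in atomos and len(pila) > 0 and pila[-1]== '-'):
--             i += 1
--             atomo = listax[i]
--             pila = pila[:-1]
--             pila.append(atomo)
--             l.append(["(", atomo, "=", "-"+s , ")"])
--             A = A[1:]
--             if len(A) > 0:
--                 s = A[0]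
--         elif(s==')'):
--             w=pila[-1]
--             o=pila[-2]
--             v=pila[-3]
--             pila = pila[:len(pila)-4]
--             i+=1
--             atomo = listax[i]
--             l.append(["(", atomo, "=", "(", v, o, w, ")",")"])
--             s=atomo
--         else:
--             pila.append(s)
--             A=A[1:]
--             if(len(A)>0):
--                 s=A[0]
--     B = []
--     l.reverse()
--
--     if i < 0:
--         atomo = pila[-1]
--     else:
--         atomo = listax[i]
--     for x in l:
--         y = x
--         B.append("*")
--         for f in y:
--             B.append(f)
--     B = [atomo] + B
--     return B
-- ===== SOURCE B (Python) =====
-- def tseitin(A, atomos):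
--     # Leftmost-redex rewriting on the token list itself: contract '-atom' pairs
--     # and '( v o w )' groups in place, prepending each flattened clause as it
--     # is produced, so no separate stack and no final reverse are needed.
--     toks = list(A)
--     flat = []          # flattened clause section, newest clause first
--     n = 0              # auxiliary variables allocated so far
--     k = 0
--     while k < len(toks):
--         if toks[k] == '-' and k + 1 < len(toks) and toks[k + 1] in atomos:
--             aux = chr(10001 + n)
--             n += 1
--             flat = ["*", "(", aux, "=", "-" + toks[k + 1], ")"] + flat
--             toks[k:k + 2] = [aux]
--         elif toks[k] == ')':
--             aux = chr(10001 + n)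
--             n += 1
--             flat = ["*", "(", aux, "=", "(", toks[k - 3], toks[k - 2], toks[k - 1], ")", ")"] + flat
--             start = max(k - 4, 0)
--             toks[start:k + 1] = [aux]
--             k = start
--         else:
--             k += 1
--     root = chr(10000 + n) if n > 0 else toks[-1]
--     return [root] + flat
-- ===== Notes on version B (the rewrite author's own statement) =====
-- stated objective: faster
-- what changed: Replaces A's shift-reduce stack machine (separate stack, lookahead variable, repeated A=A[1:] list copying, clause list reversed at the end) by in-place leftmost-redex rewriting on the token list with a cursor, prepending each flattened clause as it is produced; Pre_ additionally excludes malformed token lists in which a ')' is reduced on a stack of height exactly 3, where A's pila[:len(pila)-4] is the accidental negative slice pila[:-1] and neither result is specified.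
import Mathlib
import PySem

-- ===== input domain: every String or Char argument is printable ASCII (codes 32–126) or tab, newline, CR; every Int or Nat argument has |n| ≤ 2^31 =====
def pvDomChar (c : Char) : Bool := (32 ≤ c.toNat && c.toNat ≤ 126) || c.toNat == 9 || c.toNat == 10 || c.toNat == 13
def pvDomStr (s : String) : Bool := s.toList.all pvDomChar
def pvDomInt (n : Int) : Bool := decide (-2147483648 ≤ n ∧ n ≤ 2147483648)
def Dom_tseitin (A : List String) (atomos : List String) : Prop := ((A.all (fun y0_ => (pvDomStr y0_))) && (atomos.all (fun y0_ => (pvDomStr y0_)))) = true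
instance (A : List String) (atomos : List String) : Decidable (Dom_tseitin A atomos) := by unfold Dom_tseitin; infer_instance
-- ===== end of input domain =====

-- B replaces A's shift-reduce stack machine (explicit stack `pila`, lookahead variable `s`,
-- clause list reversed at the end) by in-place leftmost-redex rewriting on the token list
-- with a cursor, prepending each flattened clause as it is produced (objective: faster — no per-token copying of the remaining input).

-- ===== PORT A =====
-- listax = []; for i in range(1,500): listax.append(chr(i+10000))
def tseitinListax : List String :=
  (PySem.List.pyRange 1 500 1).foldl (fun acc i => acc ++ [String.ofList [Char.ofNat (i + 10000).toNat]]) []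

-- the while-loop of A; `i` is Python's aux counter (starts at -1); error paths (Python
-- IndexError: pila[-1]/pila[-2]/pila[-3] on a short stack, listax[i] with i ≥ 499) return []
-- and are excluded by Pre_tseitin.
def tseitinLoop (atomos : List String) (Arem : List String) (s : String) (pila : List String)
    (l : List (List String)) (i : Int) : List String :=
  match Arem with
  | [] =>
    -- if i < 0: atomo = pila[-1] else atomo = listax[i]; B = [atomo] + flatten of reversed l
    let atomo : String :=
      if i < 0 then (PySem.List.pyGet? pila (-1)).getD ""
      else (PySem.List.pyGet? tseitinListax i).getD ""
    atomo :: (l.reverse.foldl (fun B x => x.foldl (fun B' f => B' ++ [f]) (B ++ ["*"])) [])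
  | a0 :: arest =>
    if s ∈ atomos ∧ 0 < pila.length ∧ PySem.List.pyGet? pila (-1) = some "-" then
      match PySem.List.pyGet? tseitinListax (i + 1) with
      | none => []  -- IndexError (i+1 ≥ 499)
      | some atomo =>
        let pila' := PySem.List.slice pila none (some (-1)) ++ [atomo]
        let l' := l ++ [["(", atomo, "=", "-" ++ s, ")"]]
        let A' := PySem.List.slice (a0 :: arest) (some 1) none
        match A' with
        | [] => tseitinLoop atomos A' s pila' l' (i + 1)
        | s' :: _ => tseitinLoop atomos A' s' pila' l' (i + 1)
    else if s = ")" then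
      match _hw : PySem.List.pyGet? pila (-1), _ho : PySem.List.pyGet? pila (-2), _hv : PySem.List.pyGet? pila (-3) with
      | some w, some o, some v =>
        (match PySem.List.pyGet? tseitinListax (i + 1) with
         | none => []  -- IndexError (i+1 ≥ 499)
         | some atomo =>
           let pila' := PySem.List.slice pila none (some ((pila.length : Int) - 4))
           let l' := l ++ [["(", atomo, "=", "(", v, o, w, ")", ")"]]
           tseitinLoop atomos (a0 :: arest) atomo pila' l' (i + 1))
      | _, _, _ => []  -- IndexError on pila[-1]/pila[-2]/pila[-3]
    else
      let pila' := pila ++ [s]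
      let A' := PySem.List.slice (a0 :: arest) (some 1) none
      match A' with
      | [] => tseitinLoop atomos A' s pila' l i
      | s' :: _ => tseitinLoop atomos A' s' pila' l i
termination_by 2 * Arem.length + pila.length
decreasing_by
  · simp_all [PySem.List.slice_from_one, PySem.List.slice_to_neg_one]; omega
  · simp_all [PySem.List.slice_from_one, PySem.List.slice_to_neg_one]; omega
  · have h3 : 3 ≤ pila.length := by
      by_contra hc
      rw [Nat.not_le] at hc
      have hnone : PySem.List.pyGet? pila (-3) = none := by
        rw [PySem.List.pyGet?_eq_none_iff, PySem.Raise.InRange]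
        omega
      rw [hnone] at _hv
      simp at _hv
    have hlt : (PySem.List.slice pila none (some ((pila.length : Int) - 4))).length < pila.length := by
      rcases Nat.lt_or_ge pila.length 4 with h4 | h4
      · have he : ((pila.length : Int) - 4) = -1 := by omega
        rw [he, PySem.List.slice_to_neg_one]
        have := pila.length_dropLast
        omega
      · have he : ((pila.length : Int) - 4) = ((pila.length - 4 : Nat) : Int) := by omega
        rw [he, PySem.List.slice_to_natCast]
        simp
        omega
    simp
    omega
  · simp_all [PySem.List.slice_from_one]; omega
  · simp_all [PySem.List.slice_from_one]; omega

def tseitin (A : List String) (atomos : List String) : List String :=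
  match A with
  | [] => []  -- s = A[0] raises IndexError; excluded by Pre_tseitin
  | s :: _ => tseitinLoop atomos A s [] [] (-1)

-- ===== PORT B =====
-- chr(10001+n) is never the one-character string ")" (needed by the port's termination measure)
theorem auxNeParen (n : Nat) : String.ofList [Char.ofNat (10001 + n)] ≠ ")" := by
  intro h
  have h1 : Char.ofNat (10001 + n) = ')' := by
    have := congrArg String.toList h
    simpa using this
  have h2 : (Char.ofNat (10001 + n)).toNat = 41 := by rw [h1]; decide
  rw [Char.toNat_ofNat] at h2
  split at h2 <;> omega

-- a splice toks[j:k+1] = [aux] with toks[k] = ")" and aux ≠ ")" shrinks length + count ")"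
theorem spliceMeasure (toks : List String) (j k : Nat) (aux : String) (hk : k < toks.length)
    (hj : j ≤ k) (hne : aux ≠ ")") (hcur : toks.getD k "" = ")") :
    (toks.take j ++ [aux] ++ toks.drop (k + 1)).length +
      (toks.take j ++ [aux] ++ toks.drop (k + 1)).count ")" <
    toks.length + toks.count ")" := by
  have hsplit : toks = toks.take j ++ ((toks.drop j).take (k + 1 - j) ++ toks.drop (k + 1)) := by
    rw [show toks.drop (k + 1) = (toks.drop j).drop (k + 1 - j) by
        rw [List.drop_drop]; congr 1; omega,
      List.take_append_drop, List.take_append_drop]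
  have hmem : ")" ∈ (toks.drop j).take (k + 1 - j) := by
    have hgk : toks[k]? = some ")" := by
      rw [List.getElem?_eq_getElem hk]
      rw [List.getD_eq_getElem?_getD, List.getElem?_eq_getElem hk] at hcur
      simpa using hcur
    have : ((toks.drop j).take (k + 1 - j))[k - j]? = some ")" := by
      rw [List.getElem?_take_of_lt (by omega)]
      simp only [List.getElem?_drop]
      rw [show j + (k - j) = k by omega]
      exact hgk
    exact List.mem_of_getElem? this
  have hcnt : 1 ≤ ((toks.drop j).take (k + 1 - j)).count ")" := List.one_le_count_iff.mpr hmem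
  have hlen : 1 ≤ ((toks.drop j).take (k + 1 - j)).length := List.length_pos_of_mem hmem
  have hc : toks.count ")" = (toks.take j).count ")" +
      (((toks.drop j).take (k + 1 - j)).count ")" + (toks.drop (k + 1)).count ")") := by
    conv_lhs => rw [hsplit]
    rw [List.count_append, List.count_append]
  have hl : toks.length = (toks.take j).length +
      (((toks.drop j).take (k + 1 - j)).length + (toks.drop (k + 1)).length) := by
    conv_lhs => rw [hsplit]
    rw [List.length_append, List.length_append]
  have hauxc : ([aux] : List String).count ")" = 0 := by
    simp [hne]
  rw [List.count_append, List.count_append, hauxc, List.length_append, List.length_append]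
  simp only [List.length_singleton]
  omega

-- one rewriting step loop of Source B: cursor k over toks, flat = flattened clauses newest first,
-- n = auxiliaries allocated; Nat subtraction in `take (k - 4)` / `k - 4` is Python's
-- max(k - 4, 0).  The reads toks[k-3], toks[k-2], toks[k-1] are exact for k ≥ 3 — i.e. on
-- all of Pre_tseitin; for k < 3 Python wraps around negatively (only reachable outside
-- Pre_tseitin, where Python A raises).
def tseitinAltGo (atomos : List String) (toks : List String) (k : Nat) (flat : List String)
    (n : Nat) : List String :=
  if hk : k < toks.length then
    let t := toks.getD k ""
    if t = "-" ∧ k + 1 < toks.length ∧ toks.getD (k + 1) "" ∈ atomos then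
      let aux := String.ofList [Char.ofNat (10001 + n)]
      tseitinAltGo atomos (toks.take k ++ [aux] ++ toks.drop (k + 2)) k
        ("*" :: "(" :: aux :: "=" :: ("-" ++ toks.getD (k + 1) "") :: ")" :: flat) (n + 1)
    else if ht : t = ")" then
      let aux := String.ofList [Char.ofNat (10001 + n)]
      tseitinAltGo atomos (toks.take (k - 4) ++ [aux] ++ toks.drop (k + 1)) (k - 4)
        ("*" :: "(" :: aux :: "=" :: "(" :: toks.getD (k - 3) "" :: toks.getD (k - 2) "" ::
          toks.getD (k - 1) "" :: ")" :: ")" :: flat) (n + 1)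
    else tseitinAltGo atomos toks (k + 1) flat n
  else
    (if 0 < n then String.ofList [Char.ofNat (10000 + n)] else (toks.getLast?).getD "") :: flat
termination_by (toks.length + toks.count ")", toks.length - k)
decreasing_by
  · left
    have hc : (toks.take k ++ [String.ofList [Char.ofNat (10001 + n)]] ++ toks.drop (k + 2)).count ")" ≤ toks.count ")" := by
      have hsplit : toks = toks.take k ++ ((toks.drop k).take 2 ++ toks.drop (k + 2)) := by
        rw [show toks.drop (k + 2) = (toks.drop k).drop 2 by rw [List.drop_drop],
          List.take_append_drop, List.take_append_drop]
      have hauxc : ([String.ofList [Char.ofNat (10001 + n)]] : List String).count ")" = 0 := by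
        simp [auxNeParen n]
      conv_rhs => rw [hsplit]
      rw [List.count_append, List.count_append, List.count_append, List.count_append, hauxc]
      omega
    simp only [List.length_append, List.length_take, List.length_drop, List.length_singleton]
    omega
  · left
    exact spliceMeasure toks (k - 4) k _ hk (by omega) (auxNeParen n) ht
  · right
    omega

def tseitin_alt (A : List String) (atomos : List String) : List String :=
  tseitinAltGo atomos A 0 [] 0

-- ===== PRECONDITION & SPEC =====
-- One abstract step of the machine per token, tracking only stack height `hgt`, whether the
-- stack top is "-" (`dashTop`) and how many auxiliary variables were allocated (`used`); `none`
-- marks an excluded input (A raising, or a ")" reduced on a stack of height exactly 3).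
def tseitinStep (atomos : List String) (st : Option (Nat × Bool × Nat)) (t : String) :
    Option (Nat × Bool × Nat) :=
  match st with
  | none => none
  | some (hgt, dashTop, used) =>
    if t ∈ atomos ∧ 0 < hgt ∧ dashTop = true then
      if used + 1 ≤ 499 then some (hgt, false, used + 1) else none
    else if t = ")" then
      if 4 ≤ hgt ∧ used + 1 ≤ 499 then some (hgt - 4 + 1, false, used + 1) else none
    else some (hgt + 1, decide (t = "-"), used)

-- Pre_ excludes the inputs on which Python A raises — the empty token list (A[0]), a ')'
-- reached with fewer than 3 reduced tokens before it (pila[-3] IndexError), more than 499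
-- auxiliary allocations (listax[i] IndexError) — and, in addition, malformed token lists in
-- which a ')' is reduced on a stack of height exactly 3 (an unmatched ')'): there A's
-- pila[:len(pila)-4] is the negative slice pila[:-1], an accidental value on input no
-- formula grammar accepts, and neither program's result is specified.
def Pre_tseitin (A : List String) (atomos : List String) : Prop :=
  A ≠ [] ∧ (A.foldl (tseitinStep atomos) (some (0, false, 0))).isSome = true
instance (A : List String) (atomos : List String) : Decidable (Pre_tseitin A atomos) := by
  unfold Pre_tseitin; infer_instance

def pvWitness_tseitin : List String × List String :=
  (["(", "p", "&", "-", "q", ")"], ["p", "q"])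

def Spec_tseitin (A : List String) (atomos : List String) (out : List String) : Prop := out = tseitin_alt A atomos
instance (A : List String) (atomos : List String) (out : List String) : Decidable (Spec_tseitin A atomos out) := by unfold Spec_tseitin; infer_instance

-- ===== CLAIM (what is proved, stated in full; the proofs are below) =====
def Claim_equal_tseitin : Prop := ∀ (A : List String) (atomos : List String), Dom_tseitin A atomos → Pre_tseitin A atomos → Spec_tseitin A atomos (tseitin A atomos)

-- ===== LEMMAS AND PROOFS =====

-- the auxiliary-variable string chr(10001 + m)
def auxStr (m : Nat) : String := String.ofList [Char.ofNat (10001 + m)]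

-- flattened clause section: reversed clause list, each clause preceded by "*"
def revFlat (l : List (List String)) : List String := l.reverse.flatMap (fun c => "*" :: c)

-- Python-level value of chr(10001+m)
theorem auxStr_toList (m : Nat) (_hm : m ≤ 499) : (auxStr m).toList = [Char.ofNat (10001 + m)] := by
  simp [auxStr]

theorem char_toNat_ofNat (v : Nat) (h : v < 55296) : (Char.ofNat v).toNat = v := by
  simp [Char.ofNat, Nat.isValidChar, h]

theorem auxStr_ne_paren (m : Nat) (hm : m ≤ 499) : auxStr m ≠ ")" := by
  intro h
  have := congrArg String.toList h
  rw [auxStr_toList m hm] at this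
  have h2 : (Char.ofNat (10001 + m)).toNat = (')' : Char).toNat := by
    have : Char.ofNat (10001 + m) = ')' := by simpa using this
    rw [this]
  rw [char_toNat_ofNat _ (by omega)] at h2
  simp at h2
  omega

theorem auxStr_ne_dash (m : Nat) (hm : m ≤ 499) : auxStr m ≠ "-" := by
  intro h
  have := congrArg String.toList h
  rw [auxStr_toList m hm] at this
  have h2 : (Char.ofNat (10001 + m)).toNat = ('-' : Char).toNat := by
    have : Char.ofNat (10001 + m) = '-' := by simpa using this
    rw [this]
  rw [char_toNat_ofNat _ (by omega)] at h2
  simp at h2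
  omega

-- inner append-fold is plain append
theorem foldl_push (x : List String) : ∀ B0 : List String,
    x.foldl (fun B' f => B' ++ [f]) B0 = B0 ++ x := by
  induction x with
  | nil => simp
  | cons a t ih => intro B0; simp [ih]

-- the output-flattening loop of A computes revFlat
theorem foldl_star (ls : List (List String)) : ∀ B0 : List String,
    ls.foldl (fun B x => x.foldl (fun B' f => B' ++ [f]) (B ++ ["*"])) B0 =
      B0 ++ ls.flatMap (fun c => "*" :: c) := by
  induction ls with
  | nil => simp
  | cons c t ih =>
    intro B0
    rw [List.foldl_cons, foldl_push, ih]
    simp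

theorem revFlat_eq (l : List (List String)) :
    l.reverse.foldl (fun B x => x.foldl (fun B' f => B' ++ [f]) (B ++ ["*"])) [] = revFlat l := by
  rw [foldl_star, revFlat]
  simp

theorem revFlat_snoc (l : List (List String)) (c : List String) :
    revFlat (l ++ [c]) = "*" :: (c ++ revFlat l) := by
  simp [revFlat]

-- the 499-entry auxiliary-name table, entry by entry
theorem foldl_map_gen {α β : Type} (f : α → β) (xs : List α) : ∀ acc : List β,
    xs.foldl (fun a i => a ++ [f i]) acc = acc ++ xs.map f := by
  induction xs with
  | nil => simp
  | cons a t ih => intro acc; simp [ih]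

theorem listax_eq : tseitinListax =
    (List.range 499).map (fun k => String.ofList [Char.ofNat (10001 + k)]) := by
  rw [tseitinListax, PySem.List.pyRange_one, foldl_map_gen]
  simp [List.map_map, Function.comp]
  intro k hk
  have h : ((1 : Int) + k + 10000).toNat = 10001 + k := by omega
  rw [h]

theorem listax_get (u : Nat) (hu : u < 499) :
    PySem.List.pyGet? tseitinListax ((u : Nat) : Int) = some (auxStr u) := by
  rw [listax_eq, PySem.List.pyGet?_natCast]
  simp [auxStr, hu]

-- tseitinStep propagates none
theorem fold_none (atomos : List String) (l : List String) :
    l.foldl (tseitinStep atomos) none = none := by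
  induction l with
  | nil => rfl
  | cons a t ih => simpa [tseitinStep] using ih

-- list-indexing helpers for toks = pila ++ s :: rest
theorem getD_append_self (p : List String) (s : String) (r : List String) :
    (p ++ s :: r).getD p.length "" = s := by
  rw [List.getD_eq_getElem?_getD, List.getElem?_append_right (Nat.le_refl _)]
  simp

theorem getD_append_left (p q : List String) (j : Nat) (hj : j < p.length) :
    (p ++ q).getD j "" = p.getD j "" := by
  rw [List.getD_eq_getElem?_getD, List.getElem?_append_left hj, List.getD_eq_getElem?_getD]

theorem getD_eq_get (p : List String) (j : Nat) (hj : j < p.length) :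
    p[j]? = some (p.getD j "") := by
  rw [List.getD_eq_getElem?_getD, List.getElem?_eq_getElem hj]
  simp

-- one no-redex step of B's loop just moves the cursor
theorem altGo_advance (atomos toks : List String) (k : Nat) (flat : List String) (n : Nat)
    (hk : k < toks.length)
    (h1 : ¬ (toks.getD k "" = "-" ∧ k + 1 < toks.length ∧ toks.getD (k + 1) "" ∈ atomos))
    (h2 : toks.getD k "" ≠ ")") :
    tseitinAltGo atomos toks k flat n = tseitinAltGo atomos toks (k + 1) flat n := by
  rw [tseitinAltGo.eq_def]
  simp only [dif_pos hk]
  rw [if_neg h1, dif_neg h2]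

theorem altGo_finish (atomos toks : List String) (k : Nat) (flat : List String) (n : Nat)
    (hk : ¬ k < toks.length) :
    tseitinAltGo atomos toks k flat n =
      (if 0 < n then String.ofList [Char.ofNat (10000 + n)] else (toks.getLast?).getD "") :: flat := by
  rw [tseitinAltGo.eq_def]
  simp only [dif_neg hk]

theorem loop_finish (atomos : List String) (s : String) (pila : List String)
    (l : List (List String)) (i : Int) :
    tseitinLoop atomos [] s pila l i =
      (if i < 0 then (PySem.List.pyGet? pila (-1)).getD ""
       else (PySem.List.pyGet? tseitinListax i).getD "") :: revFlat l := by
  rw [tseitinLoop.eq_def]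
  dsimp only
  rw [revFlat_eq]

theorem main_sim (atomos : List String)
    (haux : ∀ m, m ≤ 499 → auxStr m ∉ atomos) :
    ∀ N rest s pila l u, 2 * (rest.length + 1) + pila.length ≤ N →
    ((s :: rest).foldl (tseitinStep atomos)
        (some (pila.length, decide (pila.getLast? = some "-"), u))).isSome = true →
    ¬ (s ∈ atomos ∧ 0 < pila.length ∧ pila.getLast? = some "-") →
    u ≤ 499 →
    tseitinLoop atomos (s :: rest) s pila l ((u : Int) - 1) =
      tseitinAltGo atomos (pila ++ s :: rest) pila.length (revFlat l) u := by
  intro N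
  induction N with
  | zero => intro rest s pila l u _hm _ _ _; omega
  | succ N ih =>
    intro rest s pila l u hm hfold hsync hu
    rw [List.foldl_cons] at hfold
    -- continue (via ih) or finish, from an aligned state
    have step_tail : ∀ (rest2 pila2 : List String) (l2 : List (List String)) (u2 : Nat)
        (s2' : String), 2 * rest2.length + pila2.length ≤ N →
        ((rest2.foldl (tseitinStep atomos)
            (some (pila2.length, decide (pila2.getLast? = some "-"), u2))).isSome = true) →
        (∀ s2 r2, rest2 = s2 :: r2 →
          ¬ (s2 ∈ atomos ∧ 0 < pila2.length ∧ pila2.getLast? = some "-")) →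
        u2 ≤ 499 →
        (rest2 = [] ∨ rest2.head? = some s2') →
        tseitinLoop atomos rest2 s2' pila2 l2 ((u2 : Int) - 1) =
          tseitinAltGo atomos (pila2 ++ rest2) pila2.length (revFlat l2) u2 := by
      intro rest2 pila2 l2 u2 s2' hb hf hsyncs hu2 hhead
      cases rest2 with
      | nil =>
        rw [loop_finish, List.append_nil, altGo_finish _ _ _ _ _ (by omega)]
        rcases Nat.eq_zero_or_pos u2 with h0 | h0
        · subst h0
          rw [if_pos (by omega), if_neg (by omega), PySem.List.pyGet?_neg_one]
        · rw [if_neg (by omega), if_pos h0]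
          have hc : ((u2 : Int) - 1) = ((u2 - 1 : Nat) : Int) := by omega
          rw [hc, listax_get (u2 - 1) (by omega)]
          have he : 10000 + u2 = 10001 + (u2 - 1) := by omega
          rw [he]
          rfl
      | cons s2 r2 =>
        have hs2 : s2' = s2 := by
          rcases hhead with h | h
          · exact absurd h (by simp)
          · simp at h
            exact h.symm
        rw [hs2]
        exact ih r2 s2 pila2 l2 u2 (by simp only [List.length_cons] at hb; omega) hf (hsyncs s2 r2 rfl) hu2
    -- machine-side guard of branch 1 is false at a sync state
    have hA1 : ¬ (s ∈ atomos ∧ 0 < pila.length ∧ PySem.List.pyGet? pila (-1) = some "-") := by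
      rw [PySem.List.pyGet?_neg_one]; exact hsync
    have hc1 : ¬ (s ∈ atomos ∧ 0 < pila.length ∧ decide (pila.getLast? = some "-") = true) := by
      simpa using hsync
    by_cases hs : s = ")"
    · -- reduction: machine pops v,o,w and the '(' below them and pushes a fresh auxiliary;
      -- B contracts the group in place
      subst hs
      simp only [tseitinStep] at hfold
      rw [if_neg hc1] at hfold
      simp only [if_true] at hfold
      have hcond : 4 ≤ pila.length ∧ u + 1 ≤ 499 := by
        by_contra hc
        rw [if_neg hc, fold_none] at hfold
        simp at hfold
      rw [if_pos hcond] at hfold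
      obtain ⟨h4, h499⟩ := hcond
      have hW : PySem.List.pyGet? pila (-1) = some (pila.getD (pila.length - 1) "") := by
        rw [PySem.List.pyGet?_neg_one, List.getLast?_eq_getElem?, getD_eq_get _ _ (by omega)]
      have hO : PySem.List.pyGet? pila (-2) = some (pila.getD (pila.length - 2) "") := by
        rw [PySem.List.pyGet?_neg_ofNat pila 2 (by omega) (by omega), getD_eq_get _ _ (by omega)]
      have hV : PySem.List.pyGet? pila (-3) = some (pila.getD (pila.length - 3) "") := by
        rw [PySem.List.pyGet?_neg_ofNat pila 3 (by omega) (by omega), getD_eq_get _ _ (by omega)]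
      have hi1 : ((u : Int) - 1) + 1 = ((u : Nat) : Int) := by omega
      -- unfold machine: reduce, then the forced push of the fresh auxiliary
      rw [tseitinLoop.eq_def]
      dsimp only
      rw [if_neg hA1, if_pos rfl, hW, hO, hV]
      dsimp only
      rw [hi1, listax_get u (by omega)]
      dsimp only
      rw [tseitinLoop.eq_def]
      dsimp only
      rw [if_neg (fun hcc => haux u (by omega) hcc.1), if_neg (auxStr_ne_paren u (by omega)),
        PySem.List.slice_from_one]
      simp only [List.tail_cons]
      -- B side: contract the redex at ')' in place, then step the cursor onto the auxiliary
      have hT : (pila ++ ")" :: rest).getD pila.length "" = ")" := getD_append_self _ _ _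
      have hdrop : (pila ++ ")" :: rest).drop (pila.length + 1) = rest := by
        rw [show pila ++ ")" :: rest = (pila ++ [")"]) ++ rest by simp,
          show pila.length + 1 = (pila ++ [")"]).length by simp, List.drop_left]
      have hw3 : (pila ++ ")" :: rest).getD (pila.length - 1) "" = pila.getD (pila.length - 1) "" :=
        getD_append_left _ _ _ (by omega)
      have ho3 : (pila ++ ")" :: rest).getD (pila.length - 2) "" = pila.getD (pila.length - 2) "" :=
        getD_append_left _ _ _ (by omega)
      have hv3 : (pila ++ ")" :: rest).getD (pila.length - 3) "" = pila.getD (pila.length - 3) "" :=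
        getD_append_left _ _ _ (by omega)
      rw [tseitinAltGo.eq_def]
      simp only [dif_pos (show pila.length < (pila ++ ")" :: rest).length by simp)]
      rw [hT, if_neg (by simp), dif_pos rfl, hw3, ho3, hv3]
      have hsl : PySem.List.slice pila none (some ((pila.length : Int) - 4)) =
          pila.take (pila.length - 4) := by
        rw [show ((pila.length : Int) - 4) = ((pila.length - 4 : Nat) : Int) by omega,
          PySem.List.slice_to_natCast]
      have htk : (pila ++ ")" :: rest).take (pila.length - 4) = pila.take (pila.length - 4) :=
        List.take_append_of_le_length (by omega)
      rw [hsl, htk, hdrop]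
      have hlt2 : (pila.take (pila.length - 4)).length = pila.length - 4 := by simp
      have haux2 : (pila.take (pila.length - 4) ++ [String.ofList [Char.ofNat (10001 + u)]] ++
          rest).getD (pila.length - 4) "" = auxStr u := by
        have hg := getD_append_self (pila.take (pila.length - 4))
          (String.ofList [Char.ofNat (10001 + u)]) rest
        rw [hlt2] at hg
        rw [List.append_assoc, List.singleton_append]
        exact hg
      rw [altGo_advance atomos _ (pila.length - 4) _ (u + 1)
          (by simp)
          (by rw [haux2]; rintro ⟨hd, -, -⟩; exact auxStr_ne_dash u (by omega) hd)
          (by rw [haux2]; exact auxStr_ne_paren u (by omega))]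
      have hflat : ("*" :: "(" :: String.ofList [Char.ofNat (10001 + u)] :: "=" :: "(" ::
          pila.getD (pila.length - 3) "" :: pila.getD (pila.length - 2) "" ::
          pila.getD (pila.length - 1) "" :: ")" :: ")" :: revFlat l) =
          revFlat (l ++ [["(", auxStr u, "=", "(", pila.getD (pila.length - 3) "",
            pila.getD (pila.length - 2) "", pila.getD (pila.length - 1) "", ")", ")"]]) := by
        rw [revFlat_snoc]
        rfl
      rw [hflat]
      have hass : pila.take (pila.length - 4) ++ [String.ofList [Char.ofNat (10001 + u)]] ++ rest =
          (pila.take (pila.length - 4) ++ [auxStr u]) ++ rest := by simp [auxStr]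
      have hk3 : pila.length - 4 + 1 = (pila.take (pila.length - 4) ++ [auxStr u]).length := by
        simp
      rw [hass, hk3]
      have hgl2 : (pila.take (pila.length - 4) ++ [auxStr u]).getLast? = some (auxStr u) := by simp
      have hi2 : ((u : Nat) : Int) = ((u + 1 : Nat) : Int) - 1 := by push_cast; ring
      have hf2 : ((rest.foldl (tseitinStep atomos)
          (some ((pila.take (pila.length - 4) ++ [auxStr u]).length,
            decide ((pila.take (pila.length - 4) ++ [auxStr u]).getLast? = some "-"),
            u + 1))).isSome = true) := by
        have e1 : (pila.take (pila.length - 4) ++ [auxStr u]).length = pila.length - 4 + 1 := by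
          simp
        have e2 : decide ((pila.take (pila.length - 4) ++ [auxStr u]).getLast? = some "-") =
            false := by
          rw [hgl2]
          simp [auxStr_ne_dash u (by omega)]
        rw [e1, e2]
        exact hfold
      have hsy2 : ∀ s2 r2, rest = s2 :: r2 →
          ¬ (s2 ∈ atomos ∧ 0 < (pila.take (pila.length - 4) ++ [auxStr u]).length ∧
            (pila.take (pila.length - 4) ++ [auxStr u]).getLast? = some "-") := by
        rintro s2 r2 - ⟨-, -, hcc⟩
        rw [hgl2] at hcc
        exact auxStr_ne_dash u (by omega) (by simpa using hcc)
      cases rest with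
      | nil =>
        rw [hi2]
        exact step_tail [] (pila.take (pila.length - 4) ++ [auxStr u]) _ (u + 1) (auxStr u)
          (by simp only [List.length_nil] at hm ⊢; simp; omega) hf2 hsy2 (by omega) (Or.inl rfl)
      | cons s3 r3 =>
        rw [hi2]
        exact step_tail (s3 :: r3) (pila.take (pila.length - 4) ++ [auxStr u]) _ (u + 1) s3
          (by simp only [List.length_cons] at hm ⊢; simp; omega) hf2 hsy2 (by omega) (Or.inr rfl)
    · -- no reduction at s: machine pushes s; B either contracts '-atom' or advances
      simp only [tseitinStep] at hfold
      rw [if_neg hc1, if_neg hs] at hfold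
      -- unfold machine: else-branch push of s
      rw [tseitinLoop.eq_def]
      dsimp only
      rw [if_neg hA1, if_neg hs, PySem.List.slice_from_one]
      simp only [List.tail_cons]
      cases rest with
      | nil =>
        -- machine exits after the push; B walks the cursor off the end
        rw [loop_finish]
        have hlen : (pila ++ [s]).length = pila.length + 1 := by simp
        rw [altGo_advance atomos (pila ++ [s]) pila.length (revFlat l) u (by simp)
            (by rw [getD_append_self]; rintro ⟨-, hlt, -⟩; simp at hlt)
            (by rw [getD_append_self]; exact hs),
          altGo_finish _ _ _ _ _ (by simp)]
        rcases Nat.eq_zero_or_pos u with h0 | h0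
        · subst h0
          rw [if_pos (by omega), if_neg (by omega), PySem.List.pyGet?_neg_one]
        · rw [if_neg (by omega), if_pos h0]
          have hc : ((u : Int) - 1) = ((u - 1 : Nat) : Int) := by omega
          rw [hc, listax_get (u - 1) (by omega)]
          have he : 10000 + u = 10001 + (u - 1) := by omega
          rw [he]
          rfl
      | cons a r2 =>
        by_cases hneg : s = "-" ∧ a ∈ atomos
        · -- the pushed '-' and the next atom a reduce to a fresh auxiliary
          obtain ⟨hsd, haa⟩ := hneg
          subst hsd
          rw [List.foldl_cons] at hfold
          simp only [tseitinStep] at hfold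
          rw [if_pos (by simp [haa])] at hfold
          have h499 : u + 1 ≤ 499 := by
            by_contra hc
            rw [if_neg (by omega), fold_none] at hfold
            simp at hfold
          rw [if_pos h499] at hfold
          -- machine: branch 1 replaces the pushed '-' by a fresh auxiliary
          show tseitinLoop atomos (a :: r2) a (pila ++ ["-"]) l ((u : Int) - 1) =
            tseitinAltGo atomos (pila ++ "-" :: a :: r2) pila.length (revFlat l) u
          rw [tseitinLoop.eq_def]
          dsimp only
          have hcond1 : a ∈ atomos ∧ 0 < (pila ++ ["-"]).length ∧
              PySem.List.pyGet? (pila ++ ["-"]) (-1) = some "-" :=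
            ⟨haa, by simp, PySem.List.pyGet?_neg_one_append_singleton pila "-"⟩
          rw [if_pos hcond1,
            show ((u : Int) - 1) + 1 = ((u : Nat) : Int) by omega, listax_get u (by omega)]
          dsimp only
          rw [PySem.List.slice_to_neg_one, List.dropLast_concat, PySem.List.slice_from_one]
          simp only [List.tail_cons]
          -- B: contract the '-atom' redex in place, then step the cursor onto the auxiliary
          have hT : (pila ++ "-" :: a :: r2).getD pila.length "" = "-" := getD_append_self _ _ _
          have hklt : pila.length + 1 < (pila ++ "-" :: a :: r2).length := by simp
          have hGa : (pila ++ "-" :: a :: r2).getD (pila.length + 1) "" = a := by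
            have hg := getD_append_self (pila ++ ["-"]) a r2
            simp only [List.append_assoc, List.singleton_append, List.length_append,
              List.length_cons, List.length_nil] at hg
            exact hg
          have htk : (pila ++ "-" :: a :: r2).take pila.length = pila := by
            rw [List.take_append_of_le_length (Nat.le_refl _), List.take_length]
          have hdr : (pila ++ "-" :: a :: r2).drop (pila.length + 2) = r2 := by
            rw [show pila ++ "-" :: a :: r2 = (pila ++ ["-", a]) ++ r2 by simp,
              show pila.length + 2 = (pila ++ ["-", a]).length by simp, List.drop_left]
          rw [tseitinAltGo.eq_def]
          simp only [dif_pos (show pila.length < (pila ++ "-" :: a :: r2).length by simp)]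
          rw [hT, hGa, if_pos ⟨rfl, hklt, haa⟩, htk, hdr]
          have haux2 : (pila ++ [String.ofList [Char.ofNat (10001 + u)]] ++ r2).getD
              pila.length "" = auxStr u := by
            rw [List.append_assoc, List.singleton_append]
            exact getD_append_self pila _ r2
          rw [altGo_advance atomos _ pila.length _ (u + 1)
              (by simp)
              (by rw [haux2]; rintro ⟨hd, -, -⟩; exact auxStr_ne_dash u (by omega) hd)
              (by rw [haux2]; exact auxStr_ne_paren u (by omega))]
          have hflat : ("*" :: "(" :: String.ofList [Char.ofNat (10001 + u)] :: "=" ::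
              ("-" ++ a) :: ")" :: revFlat l) =
              revFlat (l ++ [["(", auxStr u, "=", "-" ++ a, ")"]]) := by
            rw [revFlat_snoc]
            rfl
          rw [hflat]
          have hass : pila ++ [String.ofList [Char.ofNat (10001 + u)]] ++ r2 =
              (pila ++ [auxStr u]) ++ r2 := by simp [auxStr]
          have hk3 : pila.length + 1 = (pila ++ [auxStr u]).length := by simp
          rw [hass, hk3]
          have hgl2 : (pila ++ [auxStr u]).getLast? = some (auxStr u) := by simp
          have hi2 : ((u : Nat) : Int) = ((u + 1 : Nat) : Int) - 1 := by push_cast; ring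
          have hf2 : ((r2.foldl (tseitinStep atomos)
              (some ((pila ++ [auxStr u]).length,
                decide ((pila ++ [auxStr u]).getLast? = some "-"), u + 1))).isSome = true) := by
            have e1 : (pila ++ [auxStr u]).length = pila.length + 1 := by simp
            have e2 : decide ((pila ++ [auxStr u]).getLast? = some "-") = false := by
              rw [hgl2]
              simp [auxStr_ne_dash u (by omega)]
            rw [e1, e2]
            exact hfold
          have hsy2 : ∀ s2 r3, r2 = s2 :: r3 →
              ¬ (s2 ∈ atomos ∧ 0 < (pila ++ [auxStr u]).length ∧
                (pila ++ [auxStr u]).getLast? = some "-") := by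
            rintro s2 r3 - ⟨-, -, hcc⟩
            rw [hgl2] at hcc
            exact auxStr_ne_dash u (by omega) (by simpa using hcc)
          cases r2 with
          | nil =>
            rw [hi2]
            exact step_tail [] (pila ++ [auxStr u]) _ (u + 1) a
              (by simp only [List.length_nil, List.length_cons] at hm ⊢; simp; omega)
              hf2 hsy2 (by omega) (Or.inl rfl)
          | cons s3 r3 =>
            rw [hi2]
            exact step_tail (s3 :: r3) (pila ++ [auxStr u]) _ (u + 1) s3
              (by simp only [List.length_cons] at hm ⊢; simp; omega)
              hf2 hsy2 (by omega) (Or.inr rfl)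
        · -- plain shift: both sides move one token to the right
          rw [List.foldl_cons] at hfold
          -- B advances the cursor past s
          rw [altGo_advance atomos (pila ++ s :: a :: r2) pila.length (revFlat l) u (by simp)
            (by
              rw [getD_append_self]
              rintro ⟨hd, -, hmem⟩
              have : (pila ++ s :: a :: r2).getD (pila.length + 1) "" = a := by
                have := getD_append_self (pila ++ [s]) a r2
                simp only [List.append_assoc, List.singleton_append, List.length_append,
                  List.length_cons, List.length_nil] at this
                exact this
              rw [this] at hmem
              exact hneg ⟨hd, hmem⟩)
            (by rw [getD_append_self]; exact hs)]
          have hrw : pila ++ s :: a :: r2 = (pila ++ [s]) ++ a :: r2 := by simp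
          have hlen : pila.length + 1 = (pila ++ [s]).length := by simp
          rw [hrw, hlen]
          have := step_tail (a :: r2) (pila ++ [s]) l u a (by simp only [List.length_cons, List.length_append, List.length_nil] at hm ⊢; omega)
            (by
              have hgl : (pila ++ [s]).getLast? = some s := by simp
              simpa [hgl] using hfold)
            (by
              rintro s2 r3 heq hcc
              rw [List.getLast?_concat] at hcc
              obtain ⟨hc1', -, hc3⟩ := hcc
              have hsa : a = s2 := by
                have := congrArg List.head? heq
                simp at this
                exact this
              subst hsa
              exact hneg ⟨by simpa using hc3, hc1'⟩)
            hu (Or.inr rfl)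
          simpa using this

-- ===== VERDICT (by name: the statement is the Claim_ definition above) =====
theorem tseitin_spec : Claim_equal_tseitin := by
  unfold Claim_equal_tseitin Spec_tseitin
  intro A atomos hdom hpre
  obtain ⟨hne, hfold⟩ := hpre
  have hdom2 : ∀ a ∈ atomos, pvDomStr a = true := by
    unfold Dom_tseitin at hdom
    simp only [Bool.and_eq_true, List.all_eq_true] at hdom
    exact hdom.2
  have haux : ∀ m, m ≤ 499 → auxStr m ∉ atomos := by
    intro m hm hmem
    have hstr := hdom2 _ hmem
    unfold pvDomStr at hstr
    rw [auxStr_toList m hm] at hstr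
    simp only [List.all_cons, List.all_nil, Bool.and_true, pvDomChar] at hstr
    rw [char_toNat_ofNat _ (by omega)] at hstr
    simp at hstr
    omega
  cases A with
  | nil => exact absurd rfl hne
  | cons s rest =>
    show tseitinLoop atomos (s :: rest) s [] [] (-1) =
      tseitinAltGo atomos (s :: rest) 0 [] 0
    have hmain := main_sim atomos haux (2 * (rest.length + 1)) rest s [] [] 0
      (by simp) (by simpa using hfold) (by rintro ⟨-, h, -⟩; simp at h) (by omega)
    simpa [revFlat] using hmain
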